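-- pv_equiv track=rewrite | github.com/Azure-Samples/msdocs-python-flask-webapp-quickstart | app.py | optionvalues
-- ===== SOURCE A (Python) =====
-- def optionvalues(variable: str) -> str:
--     patrones = {
--         "_number": "^[0-9]+$",
--         "_date": "^[0-9\\s\\-\\.\\:]+$",
--         "_id": "^[0-9A-Za-z]+$",
--         "_amount": "^[0-9\\.]+$"
--     }
--
--     for sufijo, patron in patrones.items():
--         if variable.endswith(sufijo):
--             return patron
--
--     return "^[0-9A-Za-z ,.-]+$"
-- ===== SOURCE B (Python) =====
-- def optionvalues(variable: str) -> str:
--     patrones = {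
--         "_number": "^[0-9]+$",
--         "_date": "^[0-9\\s\\-\\.\\:]+$",
--         "_id": "^[0-9A-Za-z]+$",
--         "_amount": "^[0-9\\.]+$"
--     }
--     i = variable.rfind('_')
--     if i == -1:
--         return "^[0-9A-Za-z ,.-]+$"
--     return patrones.get(variable[i:], "^[0-9A-Za-z ,.-]+$")
-- ===== Notes on version B (the rewrite author's own statement) =====
-- stated objective: alternative
-- what changed: B replaces A's loop of endswith tests over the four suffix keys by locating the last underscore with rfind, taking the trailing slice as the candidate suffix, and doing a single dict .get lookup with the default.
import Mathlib
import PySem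

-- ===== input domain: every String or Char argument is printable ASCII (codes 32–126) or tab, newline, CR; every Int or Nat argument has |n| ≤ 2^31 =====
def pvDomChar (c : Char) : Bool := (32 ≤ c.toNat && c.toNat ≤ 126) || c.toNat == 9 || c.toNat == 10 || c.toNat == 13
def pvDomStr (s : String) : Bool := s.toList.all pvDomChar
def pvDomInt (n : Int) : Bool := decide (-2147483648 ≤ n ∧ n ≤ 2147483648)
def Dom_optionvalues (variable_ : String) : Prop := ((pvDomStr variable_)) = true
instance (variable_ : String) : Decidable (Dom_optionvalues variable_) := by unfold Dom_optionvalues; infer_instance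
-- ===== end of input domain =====

-- B computes the trailing candidate suffix with rfind('_') and one dict lookup instead of A's loop of endswith tests; same results, objective: alternative.


-- ===== PORT A =====
-- the dict literal `patrones` of A (insertion order)
def patronesA : PySem.Dict String String :=
  PySem.Dict.mk
  [("_number", "^[0-9]+$"),
   ("_date", "^[0-9\\s\\-\\.\\:]+$"),
   ("_id", "^[0-9A-Za-z]+$"),
   ("_amount", "^[0-9\\.]+$")]

-- the `for sufijo, patron in patrones.items(): if variable.endswith(sufijo): return patron` loop
def optionvaluesLoopA (variable_ : String) : List (String × String) → Option String
  | [] => none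
  | (sufijo, patron) :: rest =>
      if PySem.Str.endswith variable_ sufijo then some patron
      else optionvaluesLoopA variable_ rest

def optionvalues (variable_ : String) : String :=
  match optionvaluesLoopA variable_ (PySem.Dict.items patronesA) with
  | some patron => patron
  | none => "^[0-9A-Za-z ,.-]+$"

-- ===== PORT B =====
def patronesB : PySem.Dict String String :=
  PySem.Dict.mk
  [("_number", "^[0-9]+$"),
   ("_date", "^[0-9\\s\\-\\.\\:]+$"),
   ("_id", "^[0-9A-Za-z]+$"),
   ("_amount", "^[0-9\\.]+$")]

def optionvalues_alt (variable_ : String) : String :=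
  let i := PySem.Str.rfind variable_ "_"
  if i = -1 then "^[0-9A-Za-z ,.-]+$"
  else PySem.Dict.getD patronesB (PySem.Str.slice variable_ (some i) none) "^[0-9A-Za-z ,.-]+$"

-- ===== PRECONDITION & SPEC =====
def Spec_optionvalues (variable_ : String) (out : String) : Prop := out = optionvalues_alt variable_
instance (variable_ : String) (out : String) : Decidable (Spec_optionvalues variable_ out) := by unfold Spec_optionvalues; infer_instance

-- ===== CLAIM (what is proved, stated in full; the proofs are below) =====
def Claim_equal_optionvalues : Prop := ∀ (variable_ : String), Dom_optionvalues variable_ → Spec_optionvalues variable_ (optionvalues variable_)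

-- ===== LEMMAS AND PROOFS =====

-- split a string containing '_' at its LAST underscore
lemma last_us_split (l : List Char) (h : '_' ∈ l) :
    ∃ l₁ r, l = l₁ ++ '_' :: r ∧ '_' ∉ r := by
  induction l with
  | nil => cases h
  | cons a t ih =>
    by_cases ht : '_' ∈ t
    · obtain ⟨l₁, r, he, hr⟩ := ih ht
      exact ⟨a :: l₁, r, by simp [he], hr⟩
    · have ha : a = '_' := by
        rcases List.mem_cons.mp h with h' | h'
        · exact h'.symm
        · exact absurd h' ht
      exact ⟨[], t, by simp [ha], ht⟩

lemma rfind_go_last (l₁ r : List Char) (hr : '_' ∉ r) :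
    ∀ j, l₁.length ≤ j → PySem.Chars.rfind.go (l₁ ++ '_' :: r) ['_'] j = l₁.length := by
  intro j
  induction j with
  | zero =>
    intro hj
    have h0 : l₁ = [] := List.eq_nil_of_length_eq_zero (Nat.le_zero.mp hj)
    subst h0
    simp [PySem.Chars.rfind.go, List.isPrefixOf]
  | succ j ih =>
    intro hj
    by_cases heq : l₁.length = j + 1
    · have : List.drop (j+1) (l₁ ++ '_' :: r) = '_' :: r := by
        rw [← heq]; exact List.drop_left
      simp [PySem.Chars.rfind.go, this, List.isPrefixOf, heq]
    · have hle : l₁.length ≤ j := by omega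
      have hk : j + 1 = l₁.length + (j + 1 - l₁.length) := by omega
      have hd : List.drop (j+1) (l₁ ++ '_' :: r) = List.drop (j - l₁.length) r := by
        rw [hk, List.drop_append]
        have : j + 1 - l₁.length = (j - l₁.length) + 1 := by omega
        rw [this]; simp
      have hnp : (['_'].isPrefixOf (List.drop (j+1) (l₁ ++ '_' :: r))) = false := by
        rw [hd]
        cases hdrop : List.drop (j - l₁.length) r with
        | nil => simp [List.isPrefixOf]
        | cons b bs =>
          have hb : b ∈ r := (List.drop_subset _ r) (hdrop ▸ List.mem_cons_self)
          have hne' : ¬ ('_' = b) := fun e => hr (e ▸ hb)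
          simp [List.isPrefixOf, hne']
      simp only [PySem.Chars.rfind.go, hnp, if_neg, Bool.false_eq_true, not_false_iff]
      exact ih hle

lemma rfind_last (l l₁ r : List Char) (he : l = l₁ ++ '_' :: r) (hr : '_' ∉ r) :
    PySem.Chars.rfind l ['_'] = (l₁.length : Int) := by
  subst he
  unfold PySem.Chars.rfind
  exact rfind_go_last l₁ r hr _ (by simp)

lemma rfind_go_none (l : List Char) (h : '_' ∉ l) :
    ∀ j, PySem.Chars.rfind.go l ['_'] j = -1 := by
  intro j
  induction j with
  | zero =>
    cases hl : l with
    | nil => simp [PySem.Chars.rfind.go, List.isPrefixOf]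
    | cons b bs =>
      have hne' : ¬ ('_' = b) := fun e => h (hl ▸ (e ▸ List.mem_cons_self))
      simp [PySem.Chars.rfind.go, List.isPrefixOf, hne']
  | succ j ih =>
    have hnp : (['_'].isPrefixOf (List.drop (j+1) l)) = false := by
      cases hdrop : List.drop (j+1) l with
      | nil => simp [List.isPrefixOf]
      | cons b bs =>
        have hb : b ∈ l := (List.drop_subset _ l) (hdrop ▸ List.mem_cons_self)
        have hne' : ¬ ('_' = b) := fun e => h (e ▸ hb)
        simp [List.isPrefixOf, hne']
    simp only [PySem.Chars.rfind.go, hnp, Bool.false_eq_true, if_neg, not_false_iff]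
    exact ih

-- the last-underscore decomposition is unique
lemma tail_unique {l₁ r p w : List Char} (h : l₁ ++ '_' :: r = p ++ '_' :: w)
    (hr : '_' ∉ r) (hw : '_' ∉ w) : r = w := by
  have key : ∀ (a b c d : List Char), a ++ '_' :: b = c ++ '_' :: d → '_' ∉ d →
      c.length < a.length → False := by
    intro a b c d habcd hnd hlen
    have hd : List.drop a.length (a ++ '_' :: b) = '_' :: b := List.drop_left
    have hd2 : List.drop a.length (c ++ '_' :: d) = List.drop (a.length - c.length - 1) d := by
      have hk : a.length = c.length + (a.length - c.length) := by omega
      rw [hk, List.drop_append]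
      have : a.length - c.length = (a.length - c.length - 1) + 1 := by omega
      rw [this]; simp
    rw [habcd, hd2] at hd
    have : '_' ∈ d.drop (a.length - c.length - 1) := by rw [hd]; exact List.mem_cons_self
    exact hnd ((List.drop_subset _ d) this)
  have hlen : l₁.length = p.length := by
    rcases Nat.lt_trichotomy l₁.length p.length with h' | h' | h'
    · exact absurd (key p w l₁ r h.symm hr h') (by simp)
    · exact h'
    · exact absurd (key l₁ r p w h hw h') (by simp)
  exact (List.cons.inj (List.append_inj h hlen).2).2

-- A's endswith test, expressed through the last-underscore decomposition
lemma endswith_char (l l₁ r w : List Char) (he : l = l₁ ++ '_' :: r) (hr : '_' ∉ r)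
    (hw : '_' ∉ w) : (PySem.Chars.endswith l ('_' :: w) = true) ↔ r = w := by
  rw [PySem.Chars.endswith_iff]
  constructor
  · rintro ⟨p, hp⟩
    exact tail_unique (he ▸ hp.symm) hr hw
  · rintro rfl
    exact ⟨l₁, he.symm⟩

-- ===== VERDICT (by name: the statement is the Claim_ definition above) =====
theorem optionvalues_spec : Claim_equal_optionvalues := by
  intro variable_ _
  unfold Spec_optionvalues optionvalues optionvalues_alt
  by_cases h : '_' ∈ variable_.toList
  · obtain ⟨l₁, r, he, hr⟩ := last_us_split variable_.toList h
    have hrf : PySem.Str.rfind variable_ "_" = (l₁.length : Int) := by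
      rw [PySem.Str.rfind_eq]
      exact rfind_last variable_.toList l₁ r (by simpa using he) hr
    have hne : ((l₁.length : Int) = -1) = False := by simp
    have hkey : (PySem.Str.slice variable_ (some (l₁.length : Int)) none).toList = '_' :: r := by
      rw [PySem.Str.toList_slice, PySem.Chars.slice_eq_listSlice,
        PySem.List.slice_from_natCast, he, List.drop_left]
    have hks : ∀ (t : String),
        (t == PySem.Str.slice variable_ (some (l₁.length : Int)) none) = (t.toList == '_' :: r) := by
      intro t
      rw [← hkey]
      by_cases hq : t = PySem.Str.slice variable_ (some (l₁.length : Int)) none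
      · simp [hq]
      · have hq' : t.toList ≠ (PySem.Str.slice variable_ (some (l₁.length : Int)) none).toList :=
          fun e => hq (String.toList_inj.mp e)
        rw [beq_eq_false_iff_ne.mpr hq, beq_eq_false_iff_ne.mpr hq']
    have e1 : (PySem.Chars.endswith variable_.toList ['_','n','u','m','b','e','r'] = true) ↔ r = ['n','u','m','b','e','r'] :=
      endswith_char _ l₁ r _ he hr (by decide)
    have e2 : (PySem.Chars.endswith variable_.toList ['_','d','a','t','e'] = true) ↔ r = ['d','a','t','e'] :=
      endswith_char _ l₁ r _ he hr (by decide)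
    have e3 : (PySem.Chars.endswith variable_.toList ['_','i','d'] = true) ↔ r = ['i','d'] :=
      endswith_char _ l₁ r _ he hr (by decide)
    have e4 : (PySem.Chars.endswith variable_.toList ['_','a','m','o','u','n','t'] = true) ↔ r = ['a','m','o','u','n','t'] :=
      endswith_char _ l₁ r _ he hr (by decide)
    simp only [hrf, hne, if_false]
    simp only [optionvaluesLoopA, patronesA, patronesB, PySem.Dict.getD,
      PySem.Dict.get?]
    by_cases hc1 : r = ['n','u','m','b','e','r']
    · have hsl : PySem.Str.slice variable_ (some (l₁.length : Int)) none = "_number" := by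
        rw [← String.toList_inj, hkey, hc1]; decide
      simp [e1, hc1, hsl]
    · by_cases hc2 : r = ['d','a','t','e']
      · have hsl : PySem.Str.slice variable_ (some (l₁.length : Int)) none = "_date" := by
          rw [← String.toList_inj, hkey, hc2]; decide
        simp [e1, e2, hc2, hsl]
      · by_cases hc3 : r = ['i','d']
        · have hsl : PySem.Str.slice variable_ (some (l₁.length : Int)) none = "_id" := by
            rw [← String.toList_inj, hkey, hc3]; decide
          simp [e1, e2, e3, hc3, hsl]
        · by_cases hc4 : r = ['a','m','o','u','n','t']
          · have hsl : PySem.Str.slice variable_ (some (l₁.length : Int)) none = "_amount" := by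
              rw [← String.toList_inj, hkey, hc4]; decide
            simp [e1, e2, e3, e4, hc4, hsl]
          · have n1 : ("_number" == PySem.Str.slice variable_ (some (l₁.length : Int)) none) = false := by
              rw [hks]; simp; exact fun hq => hc1 hq.symm
            have n2 : ("_date" == PySem.Str.slice variable_ (some (l₁.length : Int)) none) = false := by
              rw [hks]; simp; exact fun hq => hc2 hq.symm
            have n3 : ("_id" == PySem.Str.slice variable_ (some (l₁.length : Int)) none) = false := by
              rw [hks]; simp; exact fun hq => hc3 hq.symm
            have n4 : ("_amount" == PySem.Str.slice variable_ (some (l₁.length : Int)) none) = false := by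
              rw [hks]; simp; exact fun hq => hc4 hq.symm
            simp [e1, e2, e3, e4, hc1, hc2, hc3, hc4, n1, n2, n3, n4]
  · have hrf : PySem.Chars.rfind variable_.toList ['_'] = -1 := by
      unfold PySem.Chars.rfind
      exact rfind_go_none variable_.toList (by simpa using h) _
    have hno : ∀ (w : List Char), '_' ∈ w → PySem.Chars.endswith variable_.toList w = false := by
      intro w hw
      cases hb : PySem.Chars.endswith variable_.toList w with
      | false => rfl
      | true =>
        rw [PySem.Chars.endswith_iff] at hb
        obtain ⟨p, hp⟩ := hb
        exact absurd (hp ▸ (List.mem_append.mpr (Or.inr hw))) h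
    simp [optionvaluesLoopA, patronesA, hrf,
      hno ['_','n','u','m','b','e','r'] (by decide), hno ['_','d','a','t','e'] (by decide),
      hno ['_','i','d'] (by decide), hno ['_','a','m','o','u','n','t'] (by decide)]
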